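-- pv_equiv track=rewrite | github.com/hogan-tech/leetcode-solution | Python/3599-partition-array-to-minimize-xor.py | minXor
-- ===== SOURCE A (Python) =====
-- from functools import lru_cache
-- from typing import List
--
-- def minXor(nums: List[int], k: int) -> int:
--
--     def canPartition(limit):
--         @lru_cache(None)
--         def dp(index: int, cuts: int) -> bool:
--             if cuts == 0:
--                 return index == len(nums)
--             xor = 0
--             for j in range(index, len(nums) - (cuts - 1)):
--                 xor ^= nums[j]
--                 if xor <= limit:
--                     if dp(j + 1, cuts - 1):
--                         return True
--             return False
--
--         return dp(0, k)
--
--     left, right = 0, 0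
--     for num in nums:
--         right ^= num
--
--     right = (1 << 31) - 1
--
--     result = right
--     while left <= right:
--         mid = (left + right) // 2
--         if canPartition(mid):
--             result = mid
--             right = mid - 1
--         else:
--             left = mid + 1
--     return result
-- ===== SOURCE B (Python) =====
-- def minXor(nums, k):
--     n = len(nums)
--
--     def feasible(limit):
--         # reach[i]: prefix nums[:i] can be split into the current number of good segments
--         reach = [True] + [False] * n
--         # more than n + 1 rounds cannot change anything: after n + 1 rounds the table is all False
--         for _ in range(min(k, n + 1)):
--             new = [False] * (n + 1)
--             for i in range(n + 1):
--                 if reach[i]: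
--                     x = 0
--                     for j in range(i, n):
--                         x ^= nums[j]
--                         if x <= limit:
--                             new[j + 1] = True
--             reach = new
--         return reach[n]
--
--     ans = 0
--     for bit in range(30, -1, -1):
--         if not feasible(ans + (1 << bit) - 1):
--             ans += 1 << bit
--     return ans
-- ===== Notes on version B (the rewrite author's own statement) =====
-- stated objective: alternative
-- what changed: Replaces A's lru_cache-memoized top-down feasibility recursion plus numeric binary search over the limit by an iterative bottom-up reachability DP table plus high-to-low bit-by-bit construction of the minimal feasible limit.
import Mathlib
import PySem

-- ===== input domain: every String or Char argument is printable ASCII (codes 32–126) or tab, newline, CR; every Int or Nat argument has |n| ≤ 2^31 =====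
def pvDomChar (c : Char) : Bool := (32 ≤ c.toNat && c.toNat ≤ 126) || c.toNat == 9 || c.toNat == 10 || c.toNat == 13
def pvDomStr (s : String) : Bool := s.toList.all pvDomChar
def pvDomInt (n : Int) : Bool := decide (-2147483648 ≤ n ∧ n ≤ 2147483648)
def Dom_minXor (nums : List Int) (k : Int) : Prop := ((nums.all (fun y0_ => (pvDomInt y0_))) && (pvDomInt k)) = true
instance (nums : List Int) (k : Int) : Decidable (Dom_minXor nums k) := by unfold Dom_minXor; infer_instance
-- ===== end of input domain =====

-- B replaces A's memoized top-down feasibility recursion + numeric binary search by an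
-- iterative bottom-up reachability DP + high-to-low bit construction of the answer
-- (objective: alternative algorithm of similar cost).

-- ===== PORT A =====
-- dp(index, cuts) of A; memoization dropped (same values); cuts is a Nat: exact for
-- k ≥ 0 (= Pre_); for k < 0 the Python raises IndexError.  nums[j] is in range
-- (j < len - (cuts-1) ≤ len), so List.getD j 0 is exact here.
def dpA (nums : List Int) (limit : Int) : Nat → Nat → Bool
  | 0, index => index == nums.length
  | c + 1, index =>
    -- for j in range(index, len(nums) - (cuts - 1)): xor ^= nums[j]; early return True
    ((List.range' index (nums.length - c - index)).foldl
      (fun (st : Bool × Int) j =>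
        if st.1 then st
        else
          let x := PySem.Int.bxor st.2 (nums.getD j 0)
          (decide (x ≤ limit) && dpA nums limit c (j + 1), x))
      (false, 0)).1

-- the while-loop of A's binary search
def bsA (nums : List Int) (k : Int) (left right result : Int) : Int :=
  if _h : left ≤ right then
    let mid := PySem.Int.floordiv (left + right) 2
    if dpA nums mid k.toNat 0 then bsA nums k left (mid - 1) mid
    else bsA nums k (mid + 1) right result
  else result
termination_by (right + 1 - left).toNat
decreasing_by
  · have := PySem.Int.floordiv_two_mid_bounds _h
    simp only [Int.toNat_lt'] at *
    omega
  · have := PySem.Int.floordiv_two_mid_bounds _h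
    simp only [Int.toNat_lt'] at *
    omega

def minXor (nums : List Int) (k : Int) : Int :=
  -- left, right = 0, ⊕nums — A computes this xor and then overwrites right, kept verbatim
  let right0 : Int := nums.foldl (fun r num => PySem.Int.bxor r num) 0
  let right : Int := right0
  let right : Int := 2 ^ 31 - 1
  bsA nums k 0 right right

-- ===== PORT B =====
-- one round of Source B's feasibility DP: from 'reach' build 'new'
def stepB (nums : List Int) (limit : Int) (reach : List Bool) : List Bool :=
  (List.range (nums.length + 1)).foldl
    (fun new i =>
      if reach.getD i false then
        ((List.range' i (nums.length - i)).foldl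
          (fun (st : List Bool × Int) j =>
            let x := PySem.Int.bxor st.2 (nums.getD j 0)
            (if x ≤ limit then st.1.set (j + 1) true else st.1, x))
          (new, 0)).1
      else new)
    (List.replicate (nums.length + 1) false)

-- feasible(limit) of Source B; range(min(k, n + 1)) runs min k.toNat (n + 1) times
-- (empty for k ≤ 0, as in Python)
def feasB (nums : List Int) (k : Int) (limit : Int) : Bool :=
  ((List.range (min k.toNat (nums.length + 1))).foldl (fun reach _ => stepB nums limit reach)
    (true :: List.replicate nums.length false)).getD nums.length false

def minXor_alt (nums : List Int) (k : Int) : Int :=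
  -- for bit in range(30, -1, -1); 1 << bit is 2^bit
  (List.range 31).reverse.foldl
    (fun ans bit => if feasB nums k (ans + 2 ^ bit - 1) then ans else ans + 2 ^ bit) 0

-- ===== PRECONDITION & SPEC =====
-- Pre_ excludes only k < 0, where the Python A raises IndexError (dp recurses past the
-- end of nums); A returns normally on every input with k ≥ 0.
def Pre_minXor (nums : List Int) (k : Int) : Prop := 0 ≤ k
instance (nums : List Int) (k : Int) : Decidable (Pre_minXor nums k) := by unfold Pre_minXor; infer_instance
def pvWitness_minXor : List Int × Int := ([3, 1, 2], 2)

def Spec_minXor (nums : List Int) (k : Int) (out : Int) : Prop := out = minXor_alt nums k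
instance (nums : List Int) (k : Int) (out : Int) : Decidable (Spec_minXor nums k out) := by unfold Spec_minXor; infer_instance

-- ===== CLAIM (what is proved, stated in full; the proofs are below) =====
def Claim_equal_minXor : Prop := ∀ (nums : List Int) (k : Int), Dom_minXor nums k → Pre_minXor nums k → Spec_minXor nums k (minXor nums k)
-- ===== LEMMAS AND PROOFS =====

-- xor of the segment nums[i:m]
def xseg (nums : List Int) (i m : Nat) : Int :=
  (List.range' i (m - i)).foldl (fun a j => PySem.Int.bxor a (nums.getD j 0)) 0

-- Chain nums limit t i m: nums[i:m] splits into exactly t contiguous nonempty segments,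
-- each with xor ≤ limit
def Chain (nums : List Int) (limit : Int) : Nat → Nat → Nat → Prop
  | 0, i, m => i = m
  | t + 1, i, m => ∃ p, i < p ∧ p ≤ m ∧ xseg nums i p ≤ limit ∧ Chain nums limit t p m

theorem xseg_self (nums : List Int) (i : Nat) : xseg nums i i = 0 := by
  simp [xseg]

theorem xseg_succ (nums : List Int) (i j : Nat) (hij : i ≤ j) :
    xseg nums i (j + 1) = PySem.Int.bxor (xseg nums i j) (nums.getD j 0) := by
  unfold xseg
  rw [show j + 1 - i = (j - i) + 1 from by omega, List.range'_concat]
  rw [List.foldl_append]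
  simp only [List.foldl_cons, List.foldl_nil]
  congr 2
  omega

theorem chain_len (nums : List Int) (limit : Int) :
    ∀ t i m, Chain nums limit t i m → i + t ≤ m := by
  intro t
  induction t with
  | zero => intro i m h; simp [Chain] at h; omega
  | succ t ih =>
    rintro i m ⟨p, hip, hpm, _, hc⟩
    have := ih p m hc
    omega

theorem chain_snoc (nums : List Int) (limit : Int) :
    ∀ t i m, Chain nums limit (t + 1) i m ↔
      ∃ p, i ≤ p ∧ p < m ∧ Chain nums limit t i p ∧ xseg nums p m ≤ limit := by
  intro t
  induction t with
  | zero =>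
    intro i m
    constructor
    · rintro ⟨p, h1, h2, h3, h4⟩
      have : p = m := h4
      subst this
      exact ⟨i, le_refl i, h1, rfl, h3⟩
    · rintro ⟨p, h1, h2, h3, h4⟩
      have : i = p := h3
      subst this
      exact ⟨m, h2, le_refl m, h4, rfl⟩
  | succ t ih =>
    intro i m
    constructor
    · rintro ⟨q, hiq, hqm, hx, hc⟩
      obtain ⟨p, h1, h2, h3, h4⟩ := (ih q m).1 hc
      exact ⟨p, by omega, h2, ⟨q, hiq, h1, hx, h3⟩, h4⟩
    · rintro ⟨p, h1, h2, ⟨q, hiq, hqp, hx, hc⟩, h4⟩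
      exact ⟨q, hiq, by omega, hx, (ih q m).2 ⟨p, hqp, by omega, hc, h4⟩⟩

theorem chain_mono (nums : List Int) (l1 l2 : Int) (h : l1 ≤ l2) :
    ∀ t i m, Chain nums l1 t i m → Chain nums l2 t i m := by
  intro t
  induction t with
  | zero => intro i m h; exact h
  | succ t ih =>
    rintro i m ⟨p, h1, h2, h3, h4⟩
    exact ⟨p, h1, h2, le_trans h3 h, ih p m h4⟩

-- the loop body of dp's inner for-loop
def fA (nums : List Int) (limit : Int) (c : Nat) : (Bool × Int) → Nat → (Bool × Int) :=
  fun st j =>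
    if st.1 then st
    else
      let x := PySem.Int.bxor st.2 (nums.getD j 0)
      (decide (x ≤ limit) && dpA nums limit c (j + 1), x)

theorem dpA_succ (nums : List Int) (limit : Int) (c i : Nat) :
    dpA nums limit (c + 1) i =
      ((List.range' i (nums.length - c - i)).foldl (fA nums limit c) (false, 0)).1 := by
  rw [dpA]
  rfl

theorem fA_true (nums : List Int) (limit : Int) (c : Nat) :
    ∀ (L : List Nat) (x : Int), L.foldl (fA nums limit c) (true, x) = (true, x) := by
  intro L
  induction L with
  | nil => intro x; rfl
  | cons a L ih => intro x; simp only [List.foldl_cons, fA, if_true]; exact ih x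

theorem fA_loop (nums : List Int) (limit : Int) (c : Nat) :
    ∀ (len p i : Nat), i ≤ p →
      (((List.range' p len).foldl (fA nums limit c) (false, xseg nums i p)).1 = true ↔
        ∃ j, p ≤ j ∧ j < p + len ∧ xseg nums i (j + 1) ≤ limit ∧
          dpA nums limit c (j + 1) = true) := by
  intro len
  induction len with
  | zero =>
    intro p i _
    simp only [List.range'_zero, List.foldl_nil]
    constructor
    · intro h; cases h
    · rintro ⟨j, h1, h2, _⟩; omega
  | succ len ih =>
    intro p i hip
    rw [List.range'_succ, List.foldl_cons]
    have hx : PySem.Int.bxor (xseg nums i p) (nums.getD p 0) = xseg nums i (p + 1) :=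
      (xseg_succ nums i p hip).symm
    show ((List.range' (p + 1) len).foldl (fA nums limit c)
        (fA nums limit c (false, xseg nums i p) p)).1 = true ↔ _
    rw [show fA nums limit c (false, xseg nums i p) p =
        (decide (xseg nums i (p + 1) ≤ limit) && dpA nums limit c (p + 1),
          xseg nums i (p + 1)) from by simp only [fA, if_neg Bool.false_ne_true]; rw [hx]]
    by_cases hb : (decide (xseg nums i (p + 1) ≤ limit) && dpA nums limit c (p + 1)) = true
    · rw [hb, fA_true]
      simp only [Bool.and_eq_true, decide_eq_true_eq] at hb
      constructor
      · intro _; exact ⟨p, le_refl p, by omega, hb.1, hb.2⟩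
      · intro _; rfl
    · rw [Bool.eq_false_iff.mpr hb]
      rw [ih (p + 1) i (by omega)]
      simp only [Bool.and_eq_true, decide_eq_true_eq, not_and_or] at hb
      constructor
      · rintro ⟨j, h1, h2, h3, h4⟩
        exact ⟨j, by omega, by omega, h3, h4⟩
      · rintro ⟨j, h1, h2, h3, h4⟩
        rcases Nat.eq_or_lt_of_le h1 with h | h
        · subst h
          rcases hb with hb | hb
          · exact absurd h3 hb
          · rw [h4] at hb; cases hb rfl
        · exact ⟨j, by omega, by omega, h3, h4⟩

theorem dpA_iff (nums : List Int) (limit : Int) :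
    ∀ c i, dpA nums limit c i = true ↔ Chain nums limit c i nums.length := by
  intro c
  induction c with
  | zero =>
    intro i
    show (i == nums.length) = true ↔ _
    simp only [beq_iff_eq]
    exact Iff.rfl
  | succ c ih =>
    intro i
    rw [dpA_succ]
    rw [show ((false : Bool), (0 : Int)) = (false, xseg nums i i) from by rw [xseg_self]]
    rw [fA_loop nums limit c (nums.length - c - i) i i (le_refl i)]
    constructor
    · rintro ⟨j, h1, h2, h3, h4⟩
      exact ⟨j + 1, by omega, by omega, h3, (ih (j + 1)).1 h4⟩
    · rintro ⟨p, h1, h2, h3, h4⟩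
      have hlen := chain_len nums limit c p nums.length h4
      refine ⟨p - 1, by omega, by omega, ?_, ?_⟩
      · rw [show p - 1 + 1 = p from by omega]; exact h3
      · rw [show p - 1 + 1 = p from by omega]; exact (ih p).2 h4

-- the loop body of feasible's inner for-loop
def fB (nums : List Int) (limit : Int) : (List Bool × Int) → Nat → (List Bool × Int) :=
  fun st j =>
    let x := PySem.Int.bxor st.2 (nums.getD j 0)
    (if x ≤ limit then st.1.set (j + 1) true else st.1, x)

-- the loop body of feasible's outer for-loop
def gB (nums : List Int) (limit : Int) (reach : List Bool) : List Bool → Nat → List Bool :=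
  fun new i =>
    if reach.getD i false then
      ((List.range' i (nums.length - i)).foldl (fB nums limit) (new, 0)).1
    else new

theorem stepB_eq (nums : List Int) (limit : Int) (reach : List Bool) :
    stepB nums limit reach =
      (List.range (nums.length + 1)).foldl (gB nums limit reach)
        (List.replicate (nums.length + 1) false) := by
  rw [stepB]
  rfl

theorem getD_replicate_false (n m : Nat) :
    (List.replicate n (false : Bool)).getD m false = false := by
  simp only [List.getD_eq_getElem?_getD, List.getElem?_replicate]
  split <;> rfl

theorem getD_set_true (l : List Bool) (a m : Nat) (ha : a < l.length) :
    (l.set a true).getD m false = true ↔ m = a ∨ l.getD m false = true := by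
  simp only [List.getD_eq_getElem?_getD, List.getElem?_set]
  by_cases h : a = m
  · subst h
    simp [ha]
  · simp [h, Ne.symm h]

theorem fB_len (nums : List Int) (limit : Int) :
    ∀ (L : List Nat) (st : List Bool × Int), ((L.foldl (fB nums limit) st).1).length = st.1.length := by
  intro L
  induction L with
  | nil => intro st; rfl
  | cons a L ih =>
    intro st
    rw [List.foldl_cons, ih]
    simp only [fB]
    split <;> simp

theorem fB_loop (nums : List Int) (limit : Int) (m : Nat) :
    ∀ (len p i : Nat) (new : List Bool), i ≤ p → p + len ≤ nums.length →
      new.length = nums.length + 1 →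
      ((((List.range' p len).foldl (fB nums limit) (new, xseg nums i p)).1).getD m false = true ↔
        new.getD m false = true ∨
          ∃ j, p ≤ j ∧ j < p + len ∧ m = j + 1 ∧ xseg nums i (j + 1) ≤ limit) := by
  intro len
  induction len with
  | zero =>
    intro p i new _ _ _
    simp only [List.range'_zero, List.foldl_nil]
    constructor
    · exact Or.inl
    · rintro (h | ⟨j, h1, h2, _⟩)
      · exact h
      · omega
  | succ len ih =>
    intro p i new hip hlen hnew
    rw [List.range'_succ, List.foldl_cons]
    have hx : PySem.Int.bxor (xseg nums i p) (nums.getD p 0) = xseg nums i (p + 1) :=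
      (xseg_succ nums i p hip).symm
    rw [show fB nums limit (new, xseg nums i p) p =
        ((if xseg nums i (p + 1) ≤ limit then new.set (p + 1) true else new),
          xseg nums i (p + 1)) from by simp only [fB]; rw [hx]]
    rw [ih (p + 1) i _ (by omega) (by omega)
      (by split <;> simp [hnew])]
    by_cases hle : xseg nums i (p + 1) ≤ limit
    · rw [if_pos hle, getD_set_true new (p + 1) m (by omega)]
      constructor
      · rintro ((h | h) | ⟨j, h1, h2, h3, h4⟩)
        · exact Or.inr ⟨p, le_refl p, by omega, h, hle⟩
        · exact Or.inl h
        · exact Or.inr ⟨j, by omega, by omega, h3, h4⟩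
      · rintro (h | ⟨j, h1, h2, h3, h4⟩)
        · exact Or.inl (Or.inr h)
        · rcases Nat.eq_or_lt_of_le h1 with h | h
          · subst h; exact Or.inl (Or.inl h3)
          · exact Or.inr ⟨j, by omega, by omega, h3, h4⟩
    · rw [if_neg hle]
      constructor
      · rintro (h | ⟨j, h1, h2, h3, h4⟩)
        · exact Or.inl h
        · exact Or.inr ⟨j, by omega, by omega, h3, h4⟩
      · rintro (h | ⟨j, h1, h2, h3, h4⟩)
        · exact Or.inl h
        · rcases Nat.eq_or_lt_of_le h1 with h | h
          · subst h; exact absurd h4 hle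
          · exact Or.inr ⟨j, by omega, by omega, h3, h4⟩

theorem gB_loop (nums : List Int) (limit : Int) (reach : List Bool) (m : Nat) :
    ∀ (is : List Nat) (acc : List Bool), (∀ i ∈ is, i ≤ nums.length) →
      acc.length = nums.length + 1 →
      ((is.foldl (gB nums limit reach) acc).getD m false = true ↔
        acc.getD m false = true ∨
          ∃ i ∈ is, reach.getD i false = true ∧
            ∃ j, i ≤ j ∧ j < nums.length ∧ m = j + 1 ∧ xseg nums i (j + 1) ≤ limit) := by
  intro is
  induction is with
  | nil =>
    intro acc _ _
    simp
  | cons a is ih =>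
    intro acc his hacc
    rw [List.foldl_cons]
    have ha : a ≤ nums.length := his a (List.mem_cons_self)
    have hnext : (gB nums limit reach acc a).length = nums.length + 1 := by
      simp only [gB]
      split
      · rw [fB_len]; exact hacc
      · exact hacc
    rw [ih (gB nums limit reach acc a) (fun i hi => his i (List.mem_cons_of_mem a hi)) hnext]
    have hgB : (gB nums limit reach acc a).getD m false = true ↔
        acc.getD m false = true ∨
          (reach.getD a false = true ∧
            ∃ j, a ≤ j ∧ j < nums.length ∧ m = j + 1 ∧ xseg nums a (j + 1) ≤ limit) := by
      simp only [gB]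
      by_cases hr : reach.getD a false = true
      · rw [if_pos hr]
        rw [show ((acc : List Bool), (0 : Int)) = (acc, xseg nums a a) from by rw [xseg_self]]
        rw [fB_loop nums limit m (nums.length - a) a a acc (le_refl a) (by omega) hacc]
        constructor
        · rintro (h | ⟨j, h1, h2, h3, h4⟩)
          · exact Or.inl h
          · exact Or.inr ⟨hr, j, h1, by omega, h3, h4⟩
        · rintro (h | ⟨_, j, h1, h2, h3, h4⟩)
          · exact Or.inl h
          · exact Or.inr ⟨j, h1, by omega, h3, h4⟩
      · rw [if_neg hr]
        constructor
        · exact Or.inl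
        · rintro (h | ⟨h1, _⟩)
          · exact h
          · exact absurd h1 hr
    rw [hgB]
    simp only [List.mem_cons]
    constructor
    · rintro ((h | ⟨h1, j, hj⟩) | ⟨i, hi, h1, hrest⟩)
      · exact Or.inl h
      · exact Or.inr ⟨a, Or.inl rfl, h1, j, hj⟩
      · exact Or.inr ⟨i, Or.inr hi, h1, hrest⟩
    · rintro (h | ⟨i, (hi | hi), h1, hrest⟩)
      · exact Or.inl (Or.inl h)
      · subst hi; exact Or.inl (Or.inr ⟨h1, hrest⟩)
      · exact Or.inr ⟨i, hi, h1, hrest⟩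

theorem stepB_getD (nums : List Int) (limit : Int) (reach : List Bool) (m : Nat) :
    ((stepB nums limit reach).getD m false = true ↔
      ∃ i, i ≤ nums.length ∧ reach.getD i false = true ∧
        ∃ j, i ≤ j ∧ j < nums.length ∧ m = j + 1 ∧ xseg nums i (j + 1) ≤ limit) := by
  rw [stepB_eq, gB_loop nums limit reach m (List.range (nums.length + 1))
    (List.replicate (nums.length + 1) false) (fun i hi => by simp at hi; omega) (by simp)]
  simp only [List.mem_range]
  rw [getD_replicate_false]
  constructor
  · rintro (h | ⟨i, hi, h⟩)
    · cases h
    · exact ⟨i, by omega, h⟩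
  · rintro ⟨i, hi, h⟩
    exact Or.inr ⟨i, by omega, h⟩

-- the iterated reachability state of feasible
def iterB (nums : List Int) (limit : Int) (t : Nat) : List Bool :=
  (List.range t).foldl (fun reach _ => stepB nums limit reach)
    (true :: List.replicate nums.length false)

theorem iterB_succ (nums : List Int) (limit : Int) (t : Nat) :
    iterB nums limit (t + 1) = stepB nums limit (iterB nums limit t) := by
  unfold iterB
  rw [List.range_succ, List.foldl_append]
  rfl

theorem iterB_getD (nums : List Int) (limit : Int) :
    ∀ (t m : Nat), m ≤ nums.length →
      ((iterB nums limit t).getD m false = true ↔ Chain nums limit t 0 m) := by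
  intro t
  induction t with
  | zero =>
    intro m _
    show ((true :: List.replicate nums.length false).getD m false = true ↔ 0 = m)
    cases m with
    | zero => simp
    | succ m =>
      simp only [List.getD_cons_succ]
      rw [getD_replicate_false]
      constructor
      · intro h; cases h
      · intro h; cases h
  | succ t ih =>
    intro m hm
    rw [iterB_succ, stepB_getD, chain_snoc]
    constructor
    · rintro ⟨i, hi, hreach, j, h1, h2, h3, h4⟩
      subst h3
      exact ⟨i, by omega, by omega, (ih i (by omega)).1 hreach, h4⟩
    · rintro ⟨p, h1, h2, h3, h4⟩
      refine ⟨p, by omega, (ih p (by omega)).2 h3, m - 1, by omega, by omega, by omega, ?_⟩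
      rw [show m - 1 + 1 = m from by omega]
      exact h4

theorem feasB_iff (nums : List Int) (k : Int) (limit : Int) :
    feasB nums k limit = true ↔ Chain nums limit k.toNat 0 nums.length := by
  show ((iterB nums limit (min k.toNat (nums.length + 1))).getD nums.length false = true ↔ _)
  by_cases h : k.toNat ≤ nums.length + 1
  · rw [min_eq_left h]
    exact iterB_getD nums limit k.toNat nums.length (le_refl _)
  · rw [min_eq_right (by omega)]
    rw [iterB_getD nums limit (nums.length + 1) nums.length (le_refl _)]
    constructor
    · intro hc
      have := chain_len nums limit (nums.length + 1) 0 nums.length hc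
      omega
    · intro hc
      have := chain_len nums limit k.toNat 0 nums.length hc
      omega

-- A result description which both loops establish, and which is unique
def ResP (P : Int → Bool) (out : Int) : Prop :=
  0 ≤ out ∧ out ≤ 2 ^ 31 - 1 ∧ (∀ x, 0 ≤ x → x < out → P x = false) ∧
    (P out = true ∨ (out = 2 ^ 31 - 1 ∧ P (2 ^ 31 - 1) = false))

theorem resP_unique (P : Int → Bool) (a b : Int) (ha : ResP P a) (hb : ResP P b) : a = b := by
  obtain ⟨ha0, haR, halt, hav⟩ := ha
  obtain ⟨hb0, hbR, hblt, hbv⟩ := hb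
  rcases lt_trichotomy a b with h | h | h
  · have hfa := hblt a ha0 h
    rcases hav with h1 | ⟨h1, _⟩
    · rw [hfa] at h1; cases h1
    · omega
  · exact h
  · have hfb := halt b hb0 h
    rcases hbv with h1 | ⟨h1, _⟩
    · rw [hfb] at h1; cases h1
    · omega

theorem bsA_correct (nums : List Int) (k : Int)
    (hmono : ∀ x y, x ≤ y → dpA nums x k.toNat 0 = true → dpA nums y k.toNat 0 = true) :
    ∀ l r res, 0 ≤ l → r ≤ 2 ^ 31 - 1 → 0 ≤ res → res ≤ 2 ^ 31 - 1 →
      (∀ x, 0 ≤ x → x < l → dpA nums x k.toNat 0 = false) →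
      (∀ x, r < x → x < res → dpA nums x k.toNat 0 = false) →
      (dpA nums res k.toNat 0 = true ∨ res = 2 ^ 31 - 1) →
      ResP (fun x => dpA nums x k.toNat 0) (bsA nums k l r res) := by
  intro l r res
  have main : ∀ N l r res, (r + 1 - l).toNat ≤ N → 0 ≤ l → r ≤ 2 ^ 31 - 1 → 0 ≤ res →
      res ≤ 2 ^ 31 - 1 →
      (∀ x, 0 ≤ x → x < l → dpA nums x k.toNat 0 = false) →
      (∀ x, r < x → x < res → dpA nums x k.toNat 0 = false) →
      (dpA nums res k.toNat 0 = true ∨ res = 2 ^ 31 - 1) →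
      ResP (fun x => dpA nums x k.toNat 0) (bsA nums k l r res) := by
    intro N
    induction N with
    | zero =>
      intro l r res hN h0l hrR h0res hresR hlo hhi hres
      rw [bsA]
      have hlr : ¬ (l ≤ r) := by omega
      simp only [hlr, dite_false]
      refine ⟨h0res, hresR, ?_, ?_⟩
      · intro x hx0 hxres
        by_cases hxl : x < l
        · exact hlo x hx0 hxl
        · exact hhi x (by omega) hxres
      · rcases hres with h | h
        · exact Or.inl h
        · subst h
          rcases Bool.eq_false_or_eq_true (dpA nums (2 ^ 31 - 1) k.toNat 0) with ht | hf
          · exact Or.inl ht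
          · exact Or.inr ⟨rfl, hf⟩
    | succ N ih =>
      intro l r res hN h0l hrR h0res hresR hlo hhi hres
      rw [bsA]
      by_cases hlr : l ≤ r
      · simp only [hlr, dite_true]
        have hmid := PySem.Int.floordiv_two_mid_bounds hlr
        set mid := PySem.Int.floordiv (l + r) 2 with hmiddef
        by_cases hP : dpA nums mid k.toNat 0 = true
        · simp only [hP, if_true]
          refine ih l (mid - 1) mid (by omega) h0l (by omega) (by omega) (by omega) hlo ?_ (Or.inl hP)
          intro x h1 h2; omega
        · simp only [hP, if_false]
          refine ih (mid + 1) r res (by omega) (by omega) hrR h0res hresR ?_ hhi hres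
          intro x hx0 hxmid
          by_cases hxl : x < l
          · exact hlo x hx0 hxl
          · rcases Bool.eq_false_or_eq_true (dpA nums x k.toNat 0) with ht | hf
            · exact absurd (hmono x mid (by omega) ht) hP
            · exact hf
      · simp only [hlr, dite_false]
        refine ⟨h0res, hresR, ?_, ?_⟩
        · intro x hx0 hxres
          by_cases hxl : x < l
          · exact hlo x hx0 hxl
          · exact hhi x (by omega) hxres
        · rcases hres with h | h
          · exact Or.inl h
          · subst h
            rcases Bool.eq_false_or_eq_true (dpA nums (2 ^ 31 - 1) k.toNat 0) with ht | hf
            · exact Or.inl ht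
            · exact Or.inr ⟨rfl, hf⟩
  exact main (r + 1 - l).toNat l r res (le_refl _)

theorem bits_correct (nums : List Int) (k : Int)
    (hmono : ∀ x y, x ≤ y → feasB nums k x = true → feasB nums k y = true) :
    ∀ b ans, 0 ≤ ans → ans + 2 ^ (b + 1) - 1 ≤ 2 ^ 31 - 1 →
      (∀ x, 0 ≤ x → x < ans → feasB nums k x = false) →
      (feasB nums k (ans + 2 ^ (b + 1) - 1) = true ∨
        (ans + 2 ^ (b + 1) - 1 = 2 ^ 31 - 1 ∧ feasB nums k (2 ^ 31 - 1) = false)) →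
      ResP (feasB nums k)
        ((List.range (b + 1)).reverse.foldl
          (fun ans bit => if feasB nums k (ans + 2 ^ bit - 1) then ans else ans + 2 ^ bit) ans) := by
  intro b
  induction b with
  | zero =>
    intro ans h0 hR hlt hP
    have e2 : ans + 2 ^ (0 + 1) - 1 = ans + 1 := by rw [zero_add, pow_one]; ring
    rw [e2] at hR hP
    simp only [zero_add, List.range_one, List.reverse_singleton, List.foldl_cons,
      List.foldl_nil, pow_zero]
    rw [show ans + 1 - 1 = ans from by ring]
    by_cases hPa : feasB nums k ans = true
    · rw [if_pos hPa]
      exact ⟨h0, by omega, hlt, Or.inl hPa⟩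
    · rw [if_neg hPa]
      refine ⟨by omega, by omega, ?_, ?_⟩
      · intro x hx0 hx
        by_cases hxa : x < ans
        · exact hlt x hx0 hxa
        · have : x = ans := by omega
          subst this
          exact Bool.eq_false_iff.mpr hPa
      · rcases hP with h | ⟨h1, h2⟩
        · exact Or.inl h
        · exact Or.inr ⟨h1, h2⟩
  | succ b ih =>
    intro ans h0 hR hlt hP
    have hpow : (0:Int) < 2 ^ (b + 1) := by positivity
    have hpow2 : (2:Int) ^ (b + 1 + 1) = 2 ^ (b + 1) + 2 ^ (b + 1) := by ring
    rw [List.range_succ, List.reverse_append, List.reverse_singleton]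
    simp only [List.singleton_append, List.foldl_cons]
    by_cases hPm : feasB nums k (ans + 2 ^ (b + 1) - 1) = true
    · simp only [hPm, if_true]
      exact ih ans h0 (by omega) hlt (Or.inl hPm)
    · simp only [hPm]
      refine ih (ans + 2 ^ (b + 1)) (by omega) (by omega) ?_ ?_
      · intro x hx0 hx
        by_cases hxa : x < ans
        · exact hlt x hx0 hxa
        · rcases Bool.eq_false_or_eq_true (feasB nums k x) with ht | hf
          · exact absurd (hmono x (ans + 2 ^ (b + 1) - 1) (by omega) ht) hPm
          · exact hf
      · rcases hP with h | ⟨h1, h2⟩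
        · exact Or.inl (by rw [show ans + 2 ^ (b + 1) + 2 ^ (b + 1) - 1 = ans + 2 ^ (b + 1 + 1) - 1 from by ring]; exact h)
        · exact Or.inr ⟨by omega, h2⟩

-- ===== VERDICT (by name: the statement is the Claim_ definition above) =====
theorem dpA_mono (nums : List Int) (k : Int) :
    ∀ x y, x ≤ y → dpA nums x k.toNat 0 = true → dpA nums y k.toNat 0 = true := by
  intro x y hxy h
  rw [dpA_iff] at h ⊢
  exact chain_mono nums x y hxy k.toNat 0 nums.length h

theorem feasB_mono (nums : List Int) (k : Int) :
    ∀ x y, x ≤ y → feasB nums k x = true → feasB nums k y = true := by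
  intro x y hxy h
  rw [feasB_iff] at h ⊢
  exact chain_mono nums x y hxy k.toNat 0 nums.length h

theorem feasB_eq_dpA (nums : List Int) (k : Int) :
    feasB nums k = fun x => dpA nums x k.toNat 0 := by
  funext x
  rcases Bool.eq_false_or_eq_true (dpA nums x k.toNat 0) with ht | hf
  · rw [ht, (feasB_iff nums k x).2 ((dpA_iff nums x k.toNat 0).1 ht)]
  · rw [hf, Bool.eq_false_iff]
    intro hc
    rw [feasB_iff] at hc
    rw [Bool.eq_false_iff] at hf
    exact hf ((dpA_iff nums x k.toNat 0).2 hc)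

theorem minXor_spec : Claim_equal_minXor := by
  unfold Claim_equal_minXor
  intro nums k _ _
  unfold Spec_minXor
  have ra : ResP (fun x => dpA nums x k.toNat 0) (minXor nums k) := by
    rw [show minXor nums k = bsA nums k 0 (2 ^ 31 - 1) (2 ^ 31 - 1) from rfl]
    refine bsA_correct nums k (dpA_mono nums k) 0 (2 ^ 31 - 1) (2 ^ 31 - 1)
      (le_refl 0) (le_refl _) (by norm_num) (le_refl _) ?_ ?_ (Or.inr rfl)
    · intro x h1 h2; omega
    · intro x h1 h2; omega
  have rb : ResP (feasB nums k) (minXor_alt nums k) := by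
    rw [show minXor_alt nums k = (List.range (30 + 1)).reverse.foldl
        (fun ans bit => if feasB nums k (ans + 2 ^ bit - 1) then ans else ans + 2 ^ bit) 0
      from rfl]
    refine bits_correct nums k (feasB_mono nums k) 30 0 (le_refl 0) (by norm_num) ?_ ?_
    · intro x h1 h2; omega
    · rw [show (0 : Int) + 2 ^ (30 + 1) - 1 = 2 ^ 31 - 1 from by norm_num]
      rcases Bool.eq_false_or_eq_true (feasB nums k (2 ^ 31 - 1)) with ht | hf
      · exact Or.inl ht
      · exact Or.inr ⟨rfl, hf⟩
  rw [feasB_eq_dpA] at rb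
  exact resP_unique (fun x => dpA nums x k.toNat 0) _ _ ra rb
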